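-- pv_equiv track=rewrite | github.com/itchyyyY/itchyyyY-PSTU_DiscreteMathematics_25-26 | Lab_4/Lab_4/main.py | is_linear
-- ===== SOURCE A (Python) =====
-- def is_linear(vec):
--     coeff = vec[:]
--     n = len(coeff)
--
--     step = 1
--     while step < n:
--         for i in range(n):
--             if i & step:
--                 coeff[i] ^= coeff[i ^ step]
--         step <<= 1
--
--     for i in range(n):
--         if coeff[i] == 1:
--             if i != 0 and (i & (i - 1)) != 0:
--                 return False
--     return True
-- ===== SOURCE B (Python) =====
-- def is_linear(vec):
--     n = len(vec)
--     for j in range(n):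
--         if j != 0 and (j & (j - 1)) != 0:
--             acc = vec[j]
--             sub = (j - 1) & j
--             while True:
--                 acc ^= vec[sub]
--                 if sub == 0:
--                     break
--                 sub = (sub - 1) & j
--             if acc == 1:
--                 return False
--     return True
-- ===== Notes on version B (the rewrite author's own statement) =====
-- stated objective: alternative
-- what changed: Replaced A's in-place butterfly (fast Moebius/ANF) transform of the whole table followed by a scan with a direct per-coefficient computation: for each multi-bit index j the ANF coefficient is computed as the XOR of vec over the descending submask enumeration of j, so no transformed copy of the table is built.
import Mathlib
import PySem

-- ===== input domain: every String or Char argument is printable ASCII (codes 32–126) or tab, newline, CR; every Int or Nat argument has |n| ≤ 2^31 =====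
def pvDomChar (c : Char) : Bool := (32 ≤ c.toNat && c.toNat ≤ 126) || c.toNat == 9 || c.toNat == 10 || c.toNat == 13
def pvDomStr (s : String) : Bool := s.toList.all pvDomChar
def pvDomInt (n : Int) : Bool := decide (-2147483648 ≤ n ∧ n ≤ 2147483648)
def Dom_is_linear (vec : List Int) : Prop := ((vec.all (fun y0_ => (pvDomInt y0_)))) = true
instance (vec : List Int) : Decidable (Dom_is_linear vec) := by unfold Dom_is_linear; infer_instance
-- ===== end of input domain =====

-- B replaces A's in-place butterfly (Möbius) transform by a direct per-coefficient XOR over the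
-- descending submask enumeration, checked only at multi-bit indices (objective: alternative algorithm).

-- ===== PORT A =====
-- All list indices below are provably in range (i ^^^ step < i whenever i &&& step ≠ 0 and step is a
-- power of two), so 'List.getD _ _ 0' is exact for Python's vec[i] here.
-- inner 'for i in range(n)' of the butterfly, updating the list in place
def isLinPass (step n : Nat) (c : List Int) : List Int :=
  (List.range n).foldl
    (fun c i => if i &&& step ≠ 0 then c.set i (PySem.Int.bxor (c.getD i 0) (c.getD (i ^^^ step) 0)) else c) c

-- 'while step < n: … ; step <<= 1'; fuel 'n' only makes the recursion total: starting from step = 1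
-- the step at least doubles each round, so the guard fails before n rounds are spent.
def isLinWhile (n : Nat) : Nat → Nat → List Int → List Int
  | 0, _, c => c
  | fuel+1, step, c => if step < n then isLinWhile n fuel (step * 2) (isLinPass step n c) else c

-- final 'for i in range(n)' scan with early return False
def isLinCheck (c : List Int) : List Nat → Bool
  | [] => true
  | i :: rest =>
    if c.getD i 0 == 1 then
      (if i ≠ 0 ∧ i &&& (i - 1) ≠ 0 then false else isLinCheck c rest)
    else isLinCheck c rest

def is_linear (vec : List Int) : Bool :=
  let coeff := vec
  let n := coeff.length
  isLinCheck (isLinWhile n n 1 coeff) (List.range n)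

-- ===== PORT B =====
-- 'while True: acc ^= vec[sub]; if sub == 0: break; sub = (sub-1) & j'
def descLoop (vec : List Int) (j : Nat) (acc : Int) (sub : Nat) : Int :=
  let acc' := PySem.Int.bxor acc (vec.getD sub 0)
  if sub = 0 then acc' else descLoop vec j acc' ((sub - 1) &&& j)
termination_by sub
decreasing_by exact Nat.lt_of_le_of_lt Nat.and_le_left (by omega)

-- 'for j in range(n)' with early return False
def altCheck (vec : List Int) : List Nat → Bool
  | [] => true
  | j :: rest =>
    if j ≠ 0 ∧ j &&& (j - 1) ≠ 0 then
      (if descLoop vec j (vec.getD j 0) ((j - 1) &&& j) == 1 then false else altCheck vec rest)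
    else altCheck vec rest

def is_linear_alt (vec : List Int) : Bool := altCheck vec (List.range vec.length)

-- ===== PRECONDITION & SPEC =====
def Spec_is_linear (vec : List Int) (out : Bool) : Prop := out = is_linear_alt vec
instance (vec : List Int) (out : Bool) : Decidable (Spec_is_linear vec out) := by unfold Spec_is_linear; infer_instance

-- ===== CLAIM (what is proved, stated in full; the proofs are below) =====
def Claim_equal_is_linear : Prop := ∀ (vec : List Int), Dom_is_linear vec → Spec_is_linear vec (is_linear vec)

-- ===== LEMMAS AND PROOFS =====

-- ---- generic facts about Python's integer xor (PySem.Int.bxor) ----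

-- sign/magnitude encoding: every Int is mkI s m, and bxor acts componentwise
def mkI (s : Bool) (m : Nat) : Int := if s then -(m : Int) - 1 else (m : Int)

theorem exists_mkI (a : Int) : ∃ s m, a = mkI s m := by
  by_cases h : 0 ≤ a
  · exact ⟨false, a.toNat, by simp [mkI]; omega⟩
  · exact ⟨true, (-a - 1).toNat, by simp [mkI]; omega⟩

theorem bxor_mkI (s₁ s₂ : Bool) (m₁ m₂ : Nat) :
    PySem.Int.bxor (mkI s₁ m₁) (mkI s₂ m₂) = mkI (s₁ ^^ s₂) (m₁ ^^^ m₂) := by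
  have e₁ : (-(-(m₁ : Int) - 1) - 1) = (m₁ : Int) := by ring
  have e₂ : (-(-(m₂ : Int) - 1) - 1) = (m₂ : Int) := by ring
  cases s₁ <;> cases s₂ <;>
    simp only [mkI, Bool.xor_false, Bool.xor_true, Bool.not_true, Bool.not_false,
      if_true, PySem.Int.bxor] <;>
    split_ifs <;>
    first
      | (exfalso; omega)
      | (rw [e₁, e₂]; simp)
      | (rw [e₂]; simp)
      | (rw [e₁]; simp)
      | simp

theorem bxor_assoc (a b c : Int) :
    PySem.Int.bxor (PySem.Int.bxor a b) c = PySem.Int.bxor a (PySem.Int.bxor b c) := by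
  obtain ⟨s₁, m₁, rfl⟩ := exists_mkI a
  obtain ⟨s₂, m₂, rfl⟩ := exists_mkI b
  obtain ⟨s₃, m₃, rfl⟩ := exists_mkI c
  rw [bxor_mkI, bxor_mkI, bxor_mkI, bxor_mkI, Bool.xor_assoc, Nat.xor_assoc]

theorem bxor_left_comm (a b c : Int) :
    PySem.Int.bxor a (PySem.Int.bxor b c) = PySem.Int.bxor b (PySem.Int.bxor a c) := by
  rw [← bxor_assoc, ← bxor_assoc, PySem.Int.bxor_comm a b]

-- ---- xor over a list of indices ----

def xorList (vec : List Int) (l : List Nat) : Int :=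
  l.foldr (fun i a => PySem.Int.bxor (vec.getD i 0) a) 0

theorem xorList_nil (vec : List Int) : xorList vec [] = 0 := rfl

theorem xorList_cons (vec : List Int) (i : Nat) (l : List Nat) :
    xorList vec (i :: l) = PySem.Int.bxor (vec.getD i 0) (xorList vec l) := rfl

theorem foldr_bxor_init (vec : List Int) (l : List Nat) (a : Int) :
    l.foldr (fun i a => PySem.Int.bxor (vec.getD i 0) a) a = PySem.Int.bxor (xorList vec l) a := by
  induction l with
  | nil => simp [xorList, PySem.Int.bxor_comm]
  | cons x xs ih =>
    simp only [List.foldr_cons]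
    rw [ih, xorList_cons, ← bxor_assoc]

theorem xorList_append (vec : List Int) (l₁ l₂ : List Nat) :
    xorList vec (l₁ ++ l₂) = PySem.Int.bxor (xorList vec l₁) (xorList vec l₂) := by
  unfold xorList
  rw [List.foldr_append, foldr_bxor_init]
  rfl

theorem xorList_perm (vec : List Int) {l₁ l₂ : List Nat} (h : l₁.Perm l₂) :
    xorList vec l₁ = xorList vec l₂ := by
  induction h with
  | nil => rfl
  | cons x _ ih => simp [xorList_cons, ih]
  | swap x y l => simp [xorList_cons, bxor_left_comm]
  | trans _ _ ih₁ ih₂ => exact ih₁.trans ih₂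

-- ---- subset-of-bits predicate ----

theorem and_eq_self_iff_testBit (i j : Nat) :
    i &&& j = i ↔ ∀ b, i.testBit b = true → j.testBit b = true := by
  constructor
  · intro h b hb
    have := congrArg (fun x => Nat.testBit x b) h
    simp only [Nat.testBit_and, hb, Bool.true_and] at this
    exact this
  · intro h
    apply Nat.eq_of_testBit_eq
    intro b
    rw [Nat.testBit_and]
    cases hb : i.testBit b
    · simp
    · simp [h b hb]

-- the parity step of &&&: (2a+x) &&& (2b+y) = 2(a&&&b) + (x&&&y) for bits x y
theorem and_parity (a b x y : Nat) (hx : x < 2) (hy : y < 2) :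
    (2 * a + x) &&& (2 * b + y) = 2 * (a &&& b) + (x &&& y) := by
  have hx' : x = (decide (x = 1)).toNat := by interval_cases x <;> simp
  have hy' : y = (decide (y = 1)).toNat := by interval_cases y <;> simp
  rw [hx', hy']
  have := Nat.land_bit (decide (x = 1)) a (decide (y = 1)) b
  rw [Nat.bit_val, Nat.bit_val, Nat.bit_val] at this
  rw [this]
  congr 1
  cases hdx : decide (x = 1) <;> cases hdy : decide (y = 1) <;> simp

-- key fact: for submasks of j, (sub-1) &&& j is the largest submask of j below sub
theorem submask_pred : ∀ sub j i, sub &&& j = sub → i &&& j = i → i < sub →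
    i ≤ (sub - 1) &&& j := by
  intro sub
  induction sub using Nat.strong_induction_on with
  | _ sub ih =>
    intro j i hsub hi hlt
    have hspos : 0 < sub := Nat.pos_of_ne_zero (by omega)
    -- decompose
    obtain ⟨s, bs, hsdec, hbs⟩ : ∃ s bs, sub = 2 * s + bs ∧ bs < 2 := ⟨sub / 2, sub % 2, by omega, by omega⟩
    obtain ⟨t, bj, htdec, hbj⟩ : ∃ t bj, j = 2 * t + bj ∧ bj < 2 := ⟨j / 2, j % 2, by omega, by omega⟩
    obtain ⟨u, bi, hudec, hbi⟩ : ∃ u bi, i = 2 * u + bi ∧ bi < 2 := ⟨i / 2, i % 2, by omega, by omega⟩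
    have hsplit : 2 * (s &&& t) + (bs &&& bj) = 2 * s + bs := by
      rw [← and_parity s t bs bj hbs hbj, ← hsdec, ← htdec]; exact hsub
    have hst : s &&& t = s ∧ bs &&& bj = bs := by
      have h1 : s &&& t ≤ s := Nat.and_le_left
      have h2 : bs &&& bj ≤ bs := Nat.and_le_left
      omega
    have hisplit : 2 * (u &&& t) + (bi &&& bj) = 2 * u + bi := by
      rw [← and_parity u t bi bj hbi hbj, ← hudec, ← htdec]; exact hi
    have hut : u &&& t = u ∧ bi &&& bj = bi := by
      have h1 : u &&& t ≤ u := Nat.and_le_left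
      have h2 : bi &&& bj ≤ bi := Nat.and_le_left
      omega
    rcases (show bs = 0 ∨ bs = 1 by omega) with hbs0 | hbs1
    · -- sub even, so s ≥ 1
      have hs1 : 1 ≤ s := by omega
      have hsub1 : sub - 1 = 2 * (s - 1) + 1 := by omega
      have hand : (sub - 1) &&& j = 2 * ((s - 1) &&& t) + (1 &&& bj) := by
        rw [hsub1, htdec, and_parity _ _ _ _ (by omega) hbj]
      have hult : u < s := by omega
      have hIH : u ≤ (s - 1) &&& t := ih s (by omega) t u hst.1 hut.1 hult
      have hbibj : bi ≤ 1 &&& bj := by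
        have : bi &&& bj = bi := hut.2
        interval_cases bi <;> interval_cases bj <;> simp_all
      omega
    · -- sub odd: sub - 1 is itself a submask of j
      have hbj1 : bj = 1 := by
        have : bs &&& bj = bs := hst.2
        interval_cases bj <;> simp_all
      have hsub1 : sub - 1 = 2 * s := by omega
      have : (sub - 1) &&& j = sub - 1 := by
        rw [hsub1, htdec]
        have := and_parity s t 0 bj (by omega) hbj
        simpa [hst.1] using this
      omega

-- ---- the Möbius coefficient, level by level (bits 0..k-1 folded in) ----

def Tfun (vec : List Int) : Nat → Nat → Int
  | 0, j => vec.getD j 0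
  | k+1, j =>
    if j &&& 2 ^ k ≠ 0 then PySem.Int.bxor (Tfun vec k j) (Tfun vec k (j ^^^ 2 ^ k))
    else Tfun vec k j

-- index list that Tfun xors over
def Lst : Nat → Nat → List Nat
  | 0, j => [j]
  | k+1, j => if j &&& 2 ^ k ≠ 0 then Lst k j ++ Lst k (j ^^^ 2 ^ k) else Lst k j

theorem and_two_pow_ne_iff (j k : Nat) : j &&& 2 ^ k ≠ 0 ↔ j.testBit k = true := by
  rw [Nat.and_two_pow]
  cases h : j.testBit k
  · simp
  · simpa using (Nat.two_pow_pos k).ne'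


theorem xor_two_pow_testBit (j k b : Nat) :
    (j ^^^ 2 ^ k).testBit b = if b = k then !(j.testBit k) else j.testBit b := by
  rw [Nat.testBit_xor]
  split_ifs with h
  · subst h; simp [Nat.testBit_two_pow_self]
  · simp [Nat.testBit_two_pow_of_ne (fun hk => h hk.symm)]

theorem xor_two_pow_lt (j k : Nat) (h : j.testBit k = true) : j ^^^ 2 ^ k < j := by
  apply Nat.lt_of_testBit k
  · rw [xor_two_pow_testBit]; simp [h]
  · exact h
  · intro b hb
    rw [xor_two_pow_testBit]
    simp [Nat.ne_of_gt hb]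

theorem Tfun_eq_xorList (vec : List Int) : ∀ k j, Tfun vec k j = xorList vec (Lst k j) := by
  intro k
  induction k with
  | zero => intro j; simp [Tfun, Lst, xorList_cons, xorList_nil]
  | succ k ih =>
    intro j
    by_cases h : j &&& 2 ^ k ≠ 0
    · simp [Tfun, Lst, h, xorList_append, ih]
    · simp [Tfun, Lst, h, ih]

theorem mem_Lst : ∀ k j i, i ∈ Lst k j ↔
    ((∀ b, i.testBit b = true → j.testBit b = true) ∧ ∀ b, k ≤ b → i.testBit b = j.testBit b) := by
  intro k
  induction k with
  | zero =>
    intro j i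
    simp only [Lst, List.mem_singleton]
    constructor
    · rintro rfl; exact ⟨fun b h => h, fun b _ => rfl⟩
    · rintro ⟨_, h2⟩; exact Nat.eq_of_testBit_eq fun b => h2 b (Nat.zero_le b)
  | succ k ih =>
    intro j i
    by_cases hb : j.testBit k = true
    · have hand : j &&& 2 ^ k ≠ 0 := (and_two_pow_ne_iff j k).mpr hb
      simp only [Lst, if_pos hand, List.mem_append, ih]
      constructor
      · rintro (⟨h1, h2⟩ | ⟨h1, h2⟩)
        · exact ⟨h1, fun b hb' => h2 b (by omega)⟩
        · refine ⟨fun b hib => ?_, fun b hb' => ?_⟩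
          · have := h1 b hib
            rw [xor_two_pow_testBit] at this
            by_cases hbk : b = k
            · subst hbk; exact hb
            · simpa [hbk] using this
          · have := h2 b (by omega)
            rw [xor_two_pow_testBit] at this
            simpa [show b ≠ k by omega] using this
      · rintro ⟨h1, h2⟩
        by_cases hik : i.testBit k = true
        · left
          refine ⟨h1, fun b hb' => ?_⟩
          rcases Nat.eq_or_lt_of_le hb' with rfl | h
          · rw [hik, hb]
          · exact h2 b (by omega)
        · right
          refine ⟨fun b hib => ?_, fun b hb' => ?_⟩
          · rw [xor_two_pow_testBit]
            have hbk : b ≠ k := fun h => by subst h; exact hik hib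
            rw [if_neg hbk]; exact h1 b hib
          · rw [xor_two_pow_testBit]
            rcases Nat.eq_or_lt_of_le hb' with rfl | h
            · rw [if_pos rfl, hb]
              simpa using hik
            · rw [if_neg (show b ≠ k by omega)]; exact h2 b (by omega)
    · have hand : ¬ j &&& 2 ^ k ≠ 0 := by
        rw [and_two_pow_ne_iff]; exact hb
      simp only [Lst, if_neg hand, ih]
      constructor
      · rintro ⟨h1, h2⟩
        exact ⟨h1, fun b hb' => h2 b (by omega)⟩
      · rintro ⟨h1, h2⟩
        refine ⟨h1, fun b hb' => ?_⟩
        rcases Nat.eq_or_lt_of_le hb' with heq | h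
        · subst heq
          cases hik : i.testBit k
          · cases hjk : j.testBit k
            · rfl
            · exact absurd hjk hb
          · exact absurd (h1 k hik) hb
        · exact h2 b (by omega)

theorem nodup_Lst : ∀ k j, (Lst k j).Nodup := by
  intro k
  induction k with
  | zero => intro j; simp [Lst]
  | succ k ih =>
    intro j
    by_cases hand : j &&& 2 ^ k ≠ 0
    · have hb : j.testBit k = true := (and_two_pow_ne_iff j k).mp hand
      simp only [Lst, if_pos hand]
      refine (ih j).append (ih _) ?_
      intro x hx hx'
      have h1 := ((mem_Lst k j x).mp hx).2 k le_rfl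
      have h2 := ((mem_Lst k (j ^^^ 2 ^ k) x).mp hx').2 k le_rfl
      rw [xor_two_pow_testBit, if_pos rfl, hb] at h2
      rw [hb] at h1
      rw [h1] at h2
      simp at h2
    · simp only [Lst, if_neg hand]
      exact ih j

-- Tfun is stable once all bits of j are covered
theorem Tfun_stable (vec : List Int) : ∀ m k j, k ≤ m → j < 2 ^ k → Tfun vec m j = Tfun vec k j := by
  intro m
  induction m with
  | zero => intro k j hk _; interval_cases k; rfl
  | succ m ih =>
    intro k j hk hj
    rcases Nat.lt_or_ge j (2 ^ m) with h | h
    · rcases Nat.eq_or_lt_of_le hk with rfl | hk'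
      · rfl
      · have hbit : j &&& 2 ^ m = 0 := by
          rw [Nat.and_two_pow, Nat.testBit_lt_two_pow h]; simp
        simp [Tfun, hbit]
        exact ih k j (by omega) hj
    · -- j ≥ 2^m but j < 2^k ≤ 2^m forces k = m+1... actually k ≤ m+1
      rcases Nat.eq_or_lt_of_le hk with rfl | hk'
      · rfl
      · exfalso
        have : 2 ^ k ≤ 2 ^ m := Nat.pow_le_pow_right (by omega) (by omega)
        omega

def Mob (vec : List Int) (j : Nat) : Int := Tfun vec j j

theorem Tfun_eq_Mob (vec : List Int) (k j : Nat) (h : j < 2 ^ k) : Tfun vec k j = Mob vec j := by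
  unfold Mob
  rcases Nat.le_total k j with hkj | hkj
  · exact (Tfun_stable vec j k j hkj h).symm
  · exact Tfun_stable vec k j j hkj Nat.lt_two_pow_self

-- ---- A's butterfly computes Mob ----

theorem pass_aux (k n : Nat) (c : List Int) (h : c.length = n) : ∀ m, m ≤ n →
    ((List.range m).foldl
      (fun c i => if i &&& 2 ^ k ≠ 0 then c.set i (PySem.Int.bxor (c.getD i 0) (c.getD (i ^^^ 2 ^ k) 0)) else c) c).length = n ∧
    ∀ j, ((List.range m).foldl
      (fun c i => if i &&& 2 ^ k ≠ 0 then c.set i (PySem.Int.bxor (c.getD i 0) (c.getD (i ^^^ 2 ^ k) 0)) else c) c).getD j 0 =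
        if j < m ∧ j &&& 2 ^ k ≠ 0 then PySem.Int.bxor (c.getD j 0) (c.getD (j ^^^ 2 ^ k) 0) else c.getD j 0 := by
  intro m
  induction m with
  | zero =>
    intro _
    simp [h]
  | succ m ih =>
    intro hm
    obtain ⟨hlen, hval⟩ := ih (by omega)
    rw [List.range_succ, List.foldl_append, List.foldl_cons, List.foldl_nil]
    by_cases hbit : m &&& 2 ^ k ≠ 0
    · rw [if_pos hbit]
      have hmx : m ^^^ 2 ^ k < m := xor_two_pow_lt m k ((and_two_pow_ne_iff m k).mp hbit)
      have hxbit : ¬ (m ^^^ 2 ^ k) &&& 2 ^ k ≠ 0 := by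
        rw [and_two_pow_ne_iff, xor_two_pow_testBit, if_pos rfl]
        simp [(and_two_pow_ne_iff m k).mp hbit]
      constructor
      · rw [List.length_set, hlen]
      · intro j
        by_cases hjm : j = m
        · subst hjm
          have hc1 : j < j + 1 ∧ j &&& 2 ^ k ≠ 0 := ⟨by omega, hbit⟩
          have hc2 : ¬ (j < j ∧ j &&& 2 ^ k ≠ 0) := fun h => absurd h.1 (Nat.lt_irrefl j)
          have hc3 : ¬ ((j ^^^ 2 ^ k) < j ∧ (j ^^^ 2 ^ k) &&& 2 ^ k ≠ 0) := fun h => hxbit h.2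
          rw [List.getD_eq_getElem?_getD, List.getElem?_set_self (by rw [hlen]; omega),
            Option.getD_some, if_pos hc1, hval j, hval (j ^^^ 2 ^ k), if_neg hc2, if_neg hc3]
        · rw [List.getD_eq_getElem?_getD, List.getElem?_set_ne (fun hh => hjm hh.symm),
            ← List.getD_eq_getElem?_getD, hval j]
          by_cases hj : j < m ∧ j &&& 2 ^ k ≠ 0
          · rw [if_pos hj, if_pos ⟨by omega, hj.2⟩]
          · rw [if_neg hj, if_neg (by intro hh; exact hj ⟨by omega, hh.2⟩)]
    · rw [if_neg hbit]
      refine ⟨hlen, fun j => ?_⟩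
      rw [hval j]
      by_cases hj : j < m ∧ j &&& 2 ^ k ≠ 0
      · rw [if_pos hj, if_pos ⟨by omega, hj.2⟩]
      · rw [if_neg hj, if_neg ?_]
        intro hh
        by_cases hjm : j = m
        · subst hjm; exact hbit hh.2
        · exact hj ⟨by omega, hh.2⟩

theorem pass_getD (k n : Nat) (c : List Int) (h : c.length = n) :
    (isLinPass (2 ^ k) n c).length = n ∧ ∀ j, j < n →
      (isLinPass (2 ^ k) n c).getD j 0 =
        if j &&& 2 ^ k ≠ 0 then PySem.Int.bxor (c.getD j 0) (c.getD (j ^^^ 2 ^ k) 0) else c.getD j 0 := by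
  obtain ⟨hlen, hval⟩ := pass_aux k n c h n le_rfl
  unfold isLinPass
  refine ⟨hlen, fun j hj => ?_⟩
  rw [hval j]
  by_cases hbit : j &&& 2 ^ k ≠ 0
  · rw [if_pos ⟨hj, hbit⟩, if_pos hbit]
  · rw [if_neg (fun hh => hbit hh.2), if_neg hbit]

theorem while_getD (vec : List Int) (n : Nat) : ∀ fuel k (c : List Int), c.length = n →
    n ≤ 2 ^ k * 2 ^ fuel → (∀ j, j < n → c.getD j 0 = Tfun vec k j) →
    ∀ j, j < n → (isLinWhile n fuel (2 ^ k) c).getD j 0 = Mob vec j := by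
  intro fuel
  induction fuel with
  | zero =>
    intro k c hlen hfuel hinv j hj
    rw [isLinWhile, hinv j hj]
    exact Tfun_eq_Mob vec k j (by simpa using lt_of_lt_of_le hj hfuel)
  | succ fuel ih =>
    intro k c hlen hfuel hinv j hj
    rw [isLinWhile]
    by_cases hg : 2 ^ k < n
    · rw [if_pos hg]
      obtain ⟨hplen, hpval⟩ := pass_getD k n c hlen
      have h2 : (2 : Nat) ^ k * 2 = 2 ^ (k + 1) := (pow_succ 2 k).symm
      rw [h2]
      apply ih (k + 1) _ hplen _ _ j hj
      · calc n ≤ 2 ^ k * 2 ^ (fuel + 1) := hfuel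
          _ = 2 ^ (k + 1) * 2 ^ fuel := by ring
      · intro j' hj'
        rw [hpval j' hj', Tfun]
        by_cases hbit : j' &&& 2 ^ k ≠ 0
        · have hx : j' ^^^ 2 ^ k < j' := xor_two_pow_lt j' k ((and_two_pow_ne_iff j' k).mp hbit)
          rw [if_pos hbit, if_pos hbit, hinv j' hj', hinv _ (by omega)]
        · rw [if_neg hbit, if_neg hbit, hinv j' hj']
    · rw [if_neg hg]
      rw [hinv j hj]
      exact Tfun_eq_Mob vec k j (by omega)

theorem coeff_value (vec : List Int) (j : Nat) (hj : j < vec.length) :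
    (isLinWhile vec.length vec.length 1 vec).getD j 0 = Mob vec j := by
  have h1 : (1 : Nat) = 2 ^ 0 := rfl
  rw [h1]
  apply while_getD vec vec.length vec.length 0 vec rfl
  · simpa using Nat.le_of_lt Nat.lt_two_pow_self
  · intro j hj; rfl
  · exact hj

-- ---- B's descent computes Mob ----

def dsubs (j sub : Nat) : List Nat :=
  sub :: (if sub = 0 then [] else dsubs j ((sub - 1) &&& j))
termination_by sub
decreasing_by exact Nat.lt_of_le_of_lt Nat.and_le_left (by omega)

theorem descLoop_eq (vec : List Int) (j : Nat) : ∀ sub acc,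
    descLoop vec j acc sub = PySem.Int.bxor acc (xorList vec (dsubs j sub)) := by
  intro sub
  induction sub using Nat.strong_induction_on with
  | _ sub ih =>
    intro acc
    rw [descLoop, dsubs]
    by_cases h : sub = 0
    · rw [if_pos h, if_pos h, xorList_cons, xorList_nil, PySem.Int.bxor_zero]
    · rw [if_neg h, if_neg h, ih _ (Nat.lt_of_le_of_lt Nat.and_le_left (by omega)),
        xorList_cons, bxor_assoc]

theorem and_submask (x j : Nat) : (x &&& j) &&& j = x &&& j := by
  rw [Nat.and_assoc, Nat.and_self]

theorem mem_dsubs : ∀ sub j i, sub &&& j = sub → (i ∈ dsubs j sub ↔ (i &&& j = i ∧ i ≤ sub)) := by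
  intro sub
  induction sub using Nat.strong_induction_on with
  | _ sub ih =>
    intro j i hsub
    rw [dsubs]
    by_cases h0 : sub = 0
    · subst h0
      rw [if_pos rfl]
      simp only [List.mem_singleton]
      constructor
      · rintro rfl; exact ⟨Nat.zero_and j, le_rfl⟩
      · rintro ⟨h1, h2⟩; omega
    · rw [if_neg h0]
      simp only [List.mem_cons]
      rw [ih _ (Nat.lt_of_le_of_lt Nat.and_le_left (by omega)) j i (and_submask _ _)]
      constructor
      · rintro (rfl | ⟨h1, h2⟩)
        · exact ⟨hsub, le_rfl⟩
        · refine ⟨h1, ?_⟩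
          have : (sub - 1) &&& j ≤ sub - 1 := Nat.and_le_left
          omega
      · rintro ⟨h1, h2⟩
        rcases Nat.eq_or_lt_of_le h2 with rfl | hlt
        · exact Or.inl rfl
        · exact Or.inr ⟨h1, submask_pred sub j i hsub h1 hlt⟩

theorem nodup_dsubs : ∀ sub j, sub &&& j = sub → (dsubs j sub).Nodup := by
  intro sub
  induction sub using Nat.strong_induction_on with
  | _ sub ih =>
    intro j hsub
    rw [dsubs]
    by_cases h0 : sub = 0
    · rw [if_pos h0]; simp
    · rw [if_neg h0]
      refine List.nodup_cons.mpr ⟨?_, ih _ (Nat.lt_of_le_of_lt Nat.and_le_left (by omega)) j (and_submask _ _)⟩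
      intro hmem
      have := ((mem_dsubs _ j sub (and_submask _ _)).mp hmem).2
      have h2 : (sub - 1) &&& j ≤ sub - 1 := Nat.and_le_left
      omega

theorem dsubs_perm_Lst (j : Nat) : (dsubs j j).Perm (Lst j j) := by
  apply List.perm_of_nodup_nodup_toFinset_eq (nodup_dsubs j j (Nat.and_self j)) (nodup_Lst j j)
  ext i
  simp only [List.mem_toFinset]
  rw [mem_dsubs j j i (Nat.and_self j), mem_Lst]
  constructor
  · rintro ⟨h1, h2⟩
    refine ⟨(and_eq_self_iff_testBit i j).mp h1, fun b hb => ?_⟩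
    have hjb : j < 2 ^ b := lt_of_lt_of_le Nat.lt_two_pow_self (Nat.pow_le_pow_right (by omega) hb)
    rw [Nat.testBit_lt_two_pow (by omega), Nat.testBit_lt_two_pow hjb]
  · rintro ⟨h1, _⟩
    have hand : i &&& j = i := (and_eq_self_iff_testBit i j).mpr h1
    exact ⟨hand, hand ▸ Nat.and_le_right⟩

theorem desc_value (vec : List Int) (j : Nat) (hj : j ≠ 0) :
    descLoop vec j (vec.getD j 0) ((j - 1) &&& j) = Mob vec j := by
  have hcons : dsubs j j = j :: dsubs j ((j - 1) &&& j) := by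
    rw [dsubs]; simp [hj]
  have : xorList vec (dsubs j j) = xorList vec (Lst j j) := xorList_perm vec (dsubs_perm_Lst j)
  rw [descLoop_eq, ← xorList_cons, ← hcons, this, ← Tfun_eq_xorList]
  rfl

-- ---- the two final scans agree ----

theorem check_eq (vec : List Int) (c : List Int)
    (hc : ∀ j, j < vec.length → j ≠ 0 → j &&& (j - 1) ≠ 0 → c.getD j 0 = Mob vec j) :
    ∀ l : List Nat, (∀ j ∈ l, j < vec.length) → isLinCheck c l = altCheck vec l := by
  intro l
  induction l with
  | nil => intro _; rfl
  | cons j rest ih =>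
    intro hl
    have hjn : j < vec.length := hl j (by simp)
    have hrest : ∀ x ∈ rest, x < vec.length := fun x hx => hl x (by simp [hx])
    show isLinCheck c (j :: rest) = altCheck vec (j :: rest)
    rw [isLinCheck, altCheck]
    by_cases hmb : j ≠ 0 ∧ j &&& (j - 1) ≠ 0
    · have hval : c.getD j 0 = Mob vec j := hc j hjn hmb.1 hmb.2
      have hdesc : descLoop vec j (vec.getD j 0) ((j - 1) &&& j) = Mob vec j := desc_value vec j hmb.1
      rw [hval, hdesc, if_pos hmb, if_pos hmb]
      split_ifs <;> first | rfl | exact ih hrest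
    · rw [if_neg hmb, if_neg hmb]
      split_ifs <;> exact ih hrest

-- ===== VERDICT (by name: the statement is the Claim_ definition above) =====
theorem is_linear_spec : Claim_equal_is_linear := by
  intro vec _
  unfold Spec_is_linear is_linear is_linear_alt
  apply check_eq
  · intro j hj _ _
    exact coeff_value vec j hj
  · intro j hjmem
    exact List.mem_range.mp hjmem
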